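-- pv_equiv track=rewrite | github.com/m3trik/tentacle | tentacle/ui/widgets/messageBox.py | _setPrefixStyle
-- ===== SOURCE A (Python) =====
-- def _setPrefixStyle(string):
-- 	'''Set style for specific keywords in the given string.
--
-- 	:Return:
-- 		(str)
-- 	'''
-- 	style = {
-- 	'Error:'	: '<hl style="color:red;">Error:</hl>',
-- 	'Warning:'	: '<hl style="color:yellow;">Warning:</hl>',
-- 	'Note:'		: '<hl style="color:blue;">Note:</hl>',
-- 	'Result:'	: '<hl style="color:green;">Result:</hl>',
-- 	}
--
-- 	for k,v in style.items():
-- 		string = string.replace(k, v)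
--
-- 	return string
-- ===== SOURCE B (Python) =====
-- import re
--
-- _STYLE = {
--     'Error:':   '<hl style="color:red;">Error:</hl>',
--     'Warning:': '<hl style="color:yellow;">Warning:</hl>',
--     'Note:':    '<hl style="color:blue;">Note:</hl>',
--     'Result:':  '<hl style="color:green;">Result:</hl>',
-- }
--
-- _PATTERN = re.compile('|'.join(re.escape(k) for k in _STYLE))
--
--
-- def _setPrefixStyle(string):
--     '''Set style for specific keywords in the given string.
--
--     :Return:
--         (str)
--     '''
--     return _PATTERN.sub(lambda m: _STYLE[m.group(0)], string)
-- ===== Notes on version B (the rewrite author's own statement) =====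
-- stated objective: idiomatic
-- what changed: Replaces the four successive full-string str.replace passes by one precompiled alternation regex that rewrites all keywords in a single left-to-right scan via the style dict as dispatch table.
import Mathlib
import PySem

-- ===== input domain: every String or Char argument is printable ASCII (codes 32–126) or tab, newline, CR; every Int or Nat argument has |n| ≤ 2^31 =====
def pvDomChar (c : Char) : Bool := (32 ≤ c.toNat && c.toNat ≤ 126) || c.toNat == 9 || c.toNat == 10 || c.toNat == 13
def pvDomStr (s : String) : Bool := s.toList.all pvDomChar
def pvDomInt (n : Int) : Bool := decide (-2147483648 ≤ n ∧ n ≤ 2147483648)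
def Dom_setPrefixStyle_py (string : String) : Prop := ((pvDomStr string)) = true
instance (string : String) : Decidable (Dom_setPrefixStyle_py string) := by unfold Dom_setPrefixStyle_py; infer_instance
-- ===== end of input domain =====

-- B replaces A's four successive full-string str.replace passes by one precompiled
-- alternation regex rewriting every keyword in a single left-to-right scan (idiomatic).

-- ===== PORT A =====
-- dict literal with distinct keys = association list in insertion order; .items() is that list
def setPrefixStyle_py (string : String) : String :=
  let style : List (String × String) :=
    [ ("Error:",   "<hl style=\"color:red;\">Error:</hl>"),
      ("Warning:", "<hl style=\"color:yellow;\">Warning:</hl>"),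
      ("Note:",    "<hl style=\"color:blue;\">Note:</hl>"),
      ("Result:",  "<hl style=\"color:green;\">Result:</hl>") ]
  style.foldl (fun s kv => PySem.Str.replace s kv.1 kv.2) string

-- ===== PORT B =====
-- B-side helpers: the compiled pattern's alternatives (in dict order) and their replacements
def pvKErr : List Char := ['E', 'r', 'r', 'o', 'r', ':']
def pvVErr : List Char := ['<', 'h', 'l', ' ', 's', 't', 'y', 'l', 'e', '=', '\"', 'c', 'o', 'l', 'o', 'r', ':', 'r', 'e', 'd', ';', '\"', '>', 'E', 'r', 'r', 'o', 'r', ':', '<', '/', 'h', 'l', '>']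
def pvKWarn : List Char := ['W', 'a', 'r', 'n', 'i', 'n', 'g', ':']
def pvVWarn : List Char := ['<', 'h', 'l', ' ', 's', 't', 'y', 'l', 'e', '=', '\"', 'c', 'o', 'l', 'o', 'r', ':', 'y', 'e', 'l', 'l', 'o', 'w', ';', '\"', '>', 'W', 'a', 'r', 'n', 'i', 'n', 'g', ':', '<', '/', 'h', 'l', '>']
def pvKNote : List Char := ['N', 'o', 't', 'e', ':']
def pvVNote : List Char := ['<', 'h', 'l', ' ', 's', 't', 'y', 'l', 'e', '=', '\"', 'c', 'o', 'l', 'o', 'r', ':', 'b', 'l', 'u', 'e', ';', '\"', '>', 'N', 'o', 't', 'e', ':', '<', '/', 'h', 'l', '>']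
def pvKRes : List Char := ['R', 'e', 's', 'u', 'l', 't', ':']
def pvVRes : List Char := ['<', 'h', 'l', ' ', 's', 't', 'y', 'l', 'e', '=', '\"', 'c', 'o', 'l', 'o', 'r', ':', 'g', 'r', 'e', 'e', 'n', ';', '\"', '>', 'R', 'e', 's', 'u', 'l', 't', ':', '<', '/', 'h', 'l', '>']

-- hand port of re.sub with the alternation 'Error:|Warning:|Note:|Result:' : one left-to-right
-- scan; at each position the alternatives are tried in order (exact: Python's re.sub semantics
-- for a plain alternation of literals)
def pvScan : List Char → List Char
  | [] => []
  | c :: t =>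
    if pvKErr.isPrefixOf (c :: t) then pvVErr ++ pvScan ((c :: t).drop pvKErr.length)
    else if pvKWarn.isPrefixOf (c :: t) then pvVWarn ++ pvScan ((c :: t).drop pvKWarn.length)
    else if pvKNote.isPrefixOf (c :: t) then pvVNote ++ pvScan ((c :: t).drop pvKNote.length)
    else if pvKRes.isPrefixOf (c :: t) then pvVRes ++ pvScan ((c :: t).drop pvKRes.length)
    else c :: pvScan t
termination_by l => l.length
decreasing_by all_goals simp [pvKErr, pvKWarn, pvKNote, pvKRes]

def setPrefixStyle_py_alt (string : String) : String :=
  String.ofList (pvScan string.toList)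

-- ===== PRECONDITION & SPEC =====
def Spec_setPrefixStyle_py (string : String) (out : String) : Prop := out = setPrefixStyle_py_alt string
instance (string : String) (out : String) : Decidable (Spec_setPrefixStyle_py string out) := by unfold Spec_setPrefixStyle_py; infer_instance

-- ===== CLAIM (what is proved, stated in full; the proofs are below) =====
def Claim_equal_setPrefixStyle_py : Prop := ∀ (string : String), Dom_setPrefixStyle_py string → Spec_setPrefixStyle_py string (setPrefixStyle_py string)

-- ===== LEMMAS AND PROOFS =====

-- a fuelled, accumulator-free rendering of PySem.Chars.replace.go
def pvRep (old new : List Char) : Nat → List Char → List Char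
  | 0, l => l
  | _ + 1, [] => []
  | fuel + 1, c :: t =>
    if old.isPrefixOf (c :: t) then new ++ pvRep old new fuel ((c :: t).drop old.length)
    else c :: pvRep old new fuel t

theorem pvGo_eq_rep (old new : List Char) :
    ∀ fuel l acc, PySem.Chars.replace.go old new fuel l acc = acc.reverse ++ pvRep old new fuel l := by
  intro fuel
  induction fuel with
  | zero =>
    intro l acc
    rw [PySem.Chars.replace.go]
    simp [pvRep]
  | succ f ih =>
    intro l acc
    cases l with
    | nil => rw [PySem.Chars.replace.go]; simp [pvRep]; omega
    | cons c t =>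
      rw [PySem.Chars.replace.go]
      by_cases h : old.isPrefixOf (c :: t) = true
      · simp only [h, if_true, ih, pvRep, List.reverse_append, List.reverse_reverse,
          List.append_assoc]
      · simp only [h, ih, pvRep]
        simp

theorem pvReplace_eq_rep (old new s : List Char) (h : old.isEmpty = false) :
    PySem.Chars.replace s old new = pvRep old new s.length s := by
  rw [PySem.Chars.replace, h]
  simp [pvGo_eq_rep]

theorem pvRep_congr (old new : List Char) (h : old ≠ []) :
    ∀ fuel fuel' l, l.length ≤ fuel → l.length ≤ fuel' → pvRep old new fuel l = pvRep old new fuel' l := by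
  intro fuel
  induction fuel with
  | zero =>
    intro fuel' l h1 _
    have : l = [] := List.length_eq_zero_iff.mp (Nat.le_zero.mp h1)
    subst this
    cases fuel' <;> simp [pvRep]
  | succ f ih =>
    intro fuel' l h1 h2
    cases l with
    | nil => cases fuel' <;> simp [pvRep]
    | cons c t =>
      cases fuel' with
      | zero => simp at h2
      | succ f' =>
        have hlen : 0 < old.length := List.length_pos_iff.mpr h
        simp only [List.length_cons] at h1 h2
        simp only [pvRep]
        by_cases hp : old.isPrefixOf (c :: t) = true
        · rw [if_pos hp, if_pos hp]
          have hd1 : ((c :: t).drop old.length).length ≤ f := by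
            simp only [List.length_drop, List.length_cons]; omega
          have hd2 : ((c :: t).drop old.length).length ≤ f' := by
            simp only [List.length_drop, List.length_cons]; omega
          rw [ih f' _ hd1 hd2]
        · rw [if_neg hp, if_neg hp]
          rw [ih f' t (by omega) (by omega)]

-- replace at exactly enough fuel
def pvR (old new l : List Char) : List Char := pvRep old new l.length l

theorem pvR_nil (old new : List Char) : pvR old new [] = [] := rfl

theorem pvR_match (old new l : List Char) (hne : old ≠ []) (h : old <+: l) :
    pvR old new l = new ++ pvR old new (l.drop old.length) := by
  have hlen : 0 < old.length := List.length_pos_iff.mpr hne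
  cases l with
  | nil => exact absurd (List.prefix_nil.mp h) hne
  | cons c t =>
    have hp : old.isPrefixOf (c :: t) = true := List.isPrefixOf_iff_prefix.mpr h
    have hle := h.length_le
    simp only [pvR, List.length_cons, pvRep, hp, if_true]
    congr 1
    exact pvRep_congr old new hne t.length ((c :: t).drop old.length).length ((c :: t).drop old.length)
      (by simp only [List.length_drop, List.length_cons]; omega) le_rfl

theorem pvR_nomatch (old new : List Char) (c : Char) (t : List Char)
    (h : ¬ old.isPrefixOf (c :: t) = true) :
    pvR old new (c :: t) = c :: pvR old new t := by
  simp only [pvR, List.length_cons, pvRep]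
  rw [if_neg h]

theorem pvR_pass (old new : List Char) (hne : old ≠ [])
    (u : List Char) (hu : ∀ p, p < u.length → ¬ (u.drop p) <+: old ∧ ¬ old <+: (u.drop p)) :
    ∀ x, pvR old new (u ++ x) = u ++ pvR old new x := by
  induction u with
  | nil => intro x; simp
  | cons c u' ih =>
    intro x
    have hhead : ¬ old.isPrefixOf (c :: (u' ++ x)) = true := by
      intro hp
      have hp' : old <+: (c :: u') ++ x := by
        simpa using List.isPrefixOf_iff_prefix.mp hp
      have h0 := hu 0 (by simp)
      rcases List.prefix_or_prefix_of_prefix hp' (List.prefix_append (c :: u') x) with h | h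
      · exact h0.2 (by simpa using h)
      · exact h0.1 (by simpa using h)
    have := pvR_nomatch old new c (u' ++ x) hhead
    simp only [List.cons_append] at this ⊢
    rw [this, ih (fun p hp => by simpa using hu (p + 1) (by simpa using hp)) x]

-- keyword matches at the head survive an unrelated replace pass
theorem pvRep_preserve (old new k : List Char) (hold : old ≠ []) (hnew : new ≠ [])
    (hhead : ∀ m, m < k.length → (k.drop m).head? ≠ new.head?)
    (hcmp : ∀ m, m < k.length → ¬ (k.drop m) <+: old ∧ ¬ old <+: (k.drop m)) :
    ∀ fuel l m, m ≤ k.length →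
      ((k.drop m).isPrefixOf (pvRep old new fuel l) = true ↔ (k.drop m).isPrefixOf l = true) := by
  intro fuel
  induction fuel with
  | zero => intro l m _; simp [pvRep]
  | succ f ih =>
    intro l m hm
    cases l with
    | nil => simp [pvRep]
    | cons c t =>
      by_cases hp : old.isPrefixOf (c :: t) = true
      · simp only [pvRep, hp, if_true]
        rcases Nat.lt_or_ge m k.length with hlt | hge
        · constructor
          · intro hL
            exfalso
            obtain ⟨n0, nrest, hn⟩ : ∃ n0 nrest, new = n0 :: nrest := by
              cases new with
              | nil => exact absurd rfl hnew
              | cons a b => exact ⟨a, b, rfl⟩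
            obtain ⟨d0, drest, hd⟩ : ∃ d0 drest, k.drop m = d0 :: drest := by
              cases hdm : k.drop m with
              | nil =>
                have := List.drop_eq_nil_iff.mp hdm
                omega
              | cons a b => exact ⟨a, b, rfl⟩
            have := hhead m hlt
            rw [hd, hn] at hL this
            simp [List.isPrefixOf] at hL this
            exact this (hL.1 ▸ rfl)
          · intro hR
            exfalso
            have hR' : k.drop m <+: c :: t := List.isPrefixOf_iff_prefix.mp hR
            have hp' : old <+: c :: t := List.isPrefixOf_iff_prefix.mp hp
            rcases List.prefix_or_prefix_of_prefix hR' hp' with h | h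
            · exact (hcmp m hlt).1 h
            · exact (hcmp m hlt).2 h
        · have hme : m = k.length := le_antisymm hm hge
          simp [hme, List.drop_length]
      · simp only [pvRep, hp, Bool.false_eq_true, if_false]
        rcases Nat.lt_or_ge m k.length with hlt | hge
        · rw [List.drop_eq_getElem_cons hlt]
          simp only [List.isPrefixOf]
          rw [Bool.and_eq_true, Bool.and_eq_true]
          have := ih t (m + 1) (by omega)
          constructor
          · rintro ⟨h1, h2⟩; exact ⟨h1, this.mp h2⟩
          · rintro ⟨h1, h2⟩; exact ⟨h1, this.mpr h2⟩
        · have hme : m = k.length := le_antisymm hm hge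
          simp [hme, List.drop_length]

theorem pvR_preserve (old new k : List Char) (hold : old ≠ []) (hnew : new ≠ [])
    (hhead : ∀ m, m < k.length → (k.drop m).head? ≠ new.head?)
    (hcmp : ∀ m, m < k.length → ¬ (k.drop m) <+: old ∧ ¬ old <+: (k.drop m))
    (l : List Char) :
    (k.isPrefixOf (pvR old new l) = true ↔ k.isPrefixOf l = true) := by
  have := pvRep_preserve old new k hold hnew hhead hcmp l.length l 0 (Nat.zero_le _)
  simpa using this

-- the composed chain of A's four replace passes
def pvChain (l : List Char) : List Char :=
  pvR pvKRes pvVRes (pvR pvKNote pvVNote (pvR pvKWarn pvVWarn (pvR pvKErr pvVErr l)))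

theorem pvChain_eq_scan : ∀ n l, l.length ≤ n → pvChain l = pvScan l := by
  intro n
  induction n with
  | zero =>
    intro l hl
    have : l = [] := List.length_eq_zero_iff.mp (Nat.le_zero.mp hl)
    subst this
    simp [pvChain, pvR_nil, pvScan]
  | succ n ih =>
    intro l hl
    cases l with
    | nil => simp [pvChain, pvR_nil, pvScan]
    | cons c t =>
      by_cases h1 : pvKErr.isPrefixOf (c :: t) = true
      · obtain ⟨u, hu⟩ := List.isPrefixOf_iff_prefix.mp h1
        rw [← hu]
        have hr1 : pvR pvKErr pvVErr (pvKErr ++ u) = pvVErr ++ pvR pvKErr pvVErr u := by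
          rw [pvR_match pvKErr pvVErr (pvKErr ++ u) (by decide) (List.prefix_append _ _)]
          simp
        have hlen : u.length ≤ n := by
          have := congrArg List.length hu
          simp [pvKErr] at this
          simp only [List.length_cons] at hl
          omega
        rw [pvChain, hr1,
          pvR_pass pvKWarn pvVWarn (by decide) pvVErr (by decide),
          pvR_pass pvKNote pvVNote (by decide) pvVErr (by decide),
          pvR_pass pvKRes pvVRes (by decide) pvVErr (by decide)]
        have hscan : pvScan (pvKErr ++ u) = pvVErr ++ pvScan u := by
          simp only [pvKErr, List.cons_append, List.nil_append]
          rw [pvScan]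
          simp [pvKErr, List.isPrefixOf]
        rw [hscan, ← pvChain, ih u hlen]
      · by_cases h2 : pvKWarn.isPrefixOf (c :: t) = true
        · obtain ⟨u, hu⟩ := List.isPrefixOf_iff_prefix.mp h2
          rw [← hu]
          have hlen : u.length ≤ n := by
            have := congrArg List.length hu
            simp [pvKWarn] at this
            simp only [List.length_cons] at hl
            omega
          have hr2 : pvR pvKWarn pvVWarn (pvKWarn ++ pvR pvKErr pvVErr u) =
              pvVWarn ++ pvR pvKWarn pvVWarn (pvR pvKErr pvVErr u) := by
            rw [pvR_match pvKWarn pvVWarn _ (by decide) (List.prefix_append _ _)]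
            simp
          rw [pvChain,
            pvR_pass pvKErr pvVErr (by decide) pvKWarn (by decide),
            hr2,
            pvR_pass pvKNote pvVNote (by decide) pvVWarn (by decide),
            pvR_pass pvKRes pvVRes (by decide) pvVWarn (by decide)]
          have hscan : pvScan (pvKWarn ++ u) = pvVWarn ++ pvScan u := by
            simp only [pvKWarn, List.cons_append, List.nil_append]
            rw [pvScan]
            simp [pvKErr, pvKWarn, List.isPrefixOf]
          rw [hscan, ← pvChain, ih u hlen]
        · by_cases h3 : pvKNote.isPrefixOf (c :: t) = true
          · obtain ⟨u, hu⟩ := List.isPrefixOf_iff_prefix.mp h3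
            rw [← hu]
            have hlen : u.length ≤ n := by
              have := congrArg List.length hu
              simp [pvKNote] at this
              simp only [List.length_cons] at hl
              omega
            have hr3 : pvR pvKNote pvVNote (pvKNote ++ pvR pvKWarn pvVWarn (pvR pvKErr pvVErr u)) =
                pvVNote ++ pvR pvKNote pvVNote (pvR pvKWarn pvVWarn (pvR pvKErr pvVErr u)) := by
              rw [pvR_match pvKNote pvVNote _ (by decide) (List.prefix_append _ _)]
              simp
            rw [pvChain,
              pvR_pass pvKErr pvVErr (by decide) pvKNote (by decide),
              pvR_pass pvKWarn pvVWarn (by decide) pvKNote (by decide),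
              hr3,
              pvR_pass pvKRes pvVRes (by decide) pvVNote (by decide)]
            have hscan : pvScan (pvKNote ++ u) = pvVNote ++ pvScan u := by
              simp only [pvKNote, List.cons_append, List.nil_append]
              rw [pvScan]
              simp [pvKErr, pvKWarn, pvKNote, List.isPrefixOf]
            rw [hscan, ← pvChain, ih u hlen]
          · by_cases h4 : pvKRes.isPrefixOf (c :: t) = true
            · obtain ⟨u, hu⟩ := List.isPrefixOf_iff_prefix.mp h4
              rw [← hu]
              have hlen : u.length ≤ n := by
                have := congrArg List.length hu
                simp [pvKRes] at this
                simp only [List.length_cons] at hl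
                omega
              have hr4 : pvR pvKRes pvVRes (pvKRes ++ pvR pvKNote pvVNote (pvR pvKWarn pvVWarn (pvR pvKErr pvVErr u))) =
                  pvVRes ++ pvR pvKRes pvVRes (pvR pvKNote pvVNote (pvR pvKWarn pvVWarn (pvR pvKErr pvVErr u))) := by
                rw [pvR_match pvKRes pvVRes _ (by decide) (List.prefix_append _ _)]
                simp
              rw [pvChain,
                pvR_pass pvKErr pvVErr (by decide) pvKRes (by decide),
                pvR_pass pvKWarn pvVWarn (by decide) pvKRes (by decide),
                pvR_pass pvKNote pvVNote (by decide) pvKRes (by decide),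
                hr4]
              have hscan : pvScan (pvKRes ++ u) = pvVRes ++ pvScan u := by
                simp only [pvKRes, List.cons_append, List.nil_append]
                rw [pvScan]
                simp [pvKErr, pvKWarn, pvKNote, pvKRes, List.isPrefixOf]
              rw [hscan, ← pvChain, ih u hlen]
            · -- no keyword matches at the head
              have hlen : t.length ≤ n := by simp at hl; omega
              have e1 : pvR pvKErr pvVErr (c :: t) = c :: pvR pvKErr pvVErr t :=
                pvR_nomatch _ _ _ _ h1
              have h2' : ¬ pvKWarn.isPrefixOf (c :: pvR pvKErr pvVErr t) = true := by
                rw [← e1]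
                intro hx
                exact h2 ((pvR_preserve pvKErr pvVErr pvKWarn (by decide) (by decide)
                  (by decide) (by decide) (c :: t)).mp hx)
              have e2 : pvR pvKWarn pvVWarn (c :: pvR pvKErr pvVErr t) =
                  c :: pvR pvKWarn pvVWarn (pvR pvKErr pvVErr t) :=
                pvR_nomatch _ _ _ _ h2'
              have h3' : ¬ pvKNote.isPrefixOf (c :: pvR pvKWarn pvVWarn (pvR pvKErr pvVErr t)) = true := by
                rw [← e2, ← e1]
                intro hx
                exact h3 (((pvR_preserve pvKErr pvVErr pvKNote (by decide) (by decide)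
                    (by decide) (by decide) (c :: t)).mp
                  ((pvR_preserve pvKWarn pvVWarn pvKNote (by decide) (by decide)
                    (by decide) (by decide) (pvR pvKErr pvVErr (c :: t))).mp hx)))
              have e3 : pvR pvKNote pvVNote (c :: pvR pvKWarn pvVWarn (pvR pvKErr pvVErr t)) =
                  c :: pvR pvKNote pvVNote (pvR pvKWarn pvVWarn (pvR pvKErr pvVErr t)) :=
                pvR_nomatch _ _ _ _ h3'
              have h4' : ¬ pvKRes.isPrefixOf (c :: pvR pvKNote pvVNote (pvR pvKWarn pvVWarn (pvR pvKErr pvVErr t))) = true := by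
                rw [← e3, ← e2, ← e1]
                intro hx
                exact h4 (((pvR_preserve pvKErr pvVErr pvKRes (by decide) (by decide)
                    (by decide) (by decide) (c :: t)).mp
                  ((pvR_preserve pvKWarn pvVWarn pvKRes (by decide) (by decide)
                    (by decide) (by decide) (pvR pvKErr pvVErr (c :: t))).mp
                  ((pvR_preserve pvKNote pvVNote pvKRes (by decide) (by decide)
                    (by decide) (by decide) (pvR pvKWarn pvVWarn (pvR pvKErr pvVErr (c :: t)))).mp hx))))
              have e4 : pvR pvKRes pvVRes (c :: pvR pvKNote pvVNote (pvR pvKWarn pvVWarn (pvR pvKErr pvVErr t))) =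
                  c :: pvR pvKRes pvVRes (pvR pvKNote pvVNote (pvR pvKWarn pvVWarn (pvR pvKErr pvVErr t))) :=
                pvR_nomatch _ _ _ _ h4'
              have hscan : pvScan (c :: t) = c :: pvScan t := by
                rw [pvScan]
                rw [if_neg h1, if_neg h2, if_neg h3, if_neg h4]
              rw [pvChain, e1, e2, e3, e4, hscan, ← pvChain, ih t hlen]

-- ===== VERDICT (by name: the statement is the Claim_ definition above) =====
theorem setPrefixStyle_py_spec : Claim_equal_setPrefixStyle_py := by
  intro string _
  unfold Spec_setPrefixStyle_py setPrefixStyle_py setPrefixStyle_py_alt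
  simp only [List.foldl, PySem.Str.replace]
  have hk1 : ("Error:" : String).toList = pvKErr := rfl
  have hk2 : ("Warning:" : String).toList = pvKWarn := rfl
  have hk3 : ("Note:" : String).toList = pvKNote := rfl
  have hk4 : ("Result:" : String).toList = pvKRes := rfl
  have hv1 : ("<hl style=\"color:red;\">Error:</hl>" : String).toList = pvVErr := rfl
  have hv2 : ("<hl style=\"color:yellow;\">Warning:</hl>" : String).toList = pvVWarn := rfl
  have hv3 : ("<hl style=\"color:blue;\">Note:</hl>" : String).toList = pvVNote := rfl
  have hv4 : ("<hl style=\"color:green;\">Result:</hl>" : String).toList = pvVRes := rfl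
  simp only [String.toList_ofList, hk1, hk2, hk3, hk4, hv1, hv2, hv3, hv4]
  rw [pvReplace_eq_rep _ _ _ (by decide), pvReplace_eq_rep _ _ _ (by decide),
    pvReplace_eq_rep _ _ _ (by decide), pvReplace_eq_rep _ _ _ (by decide)]
  have : pvChain string.toList = pvScan string.toList :=
    pvChain_eq_scan string.toList.length string.toList le_rfl
  simp only [pvChain, pvR] at this
  rw [this]
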